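-- pv_equiv track=rewrite | github.com/sudhanshuramm/practice-coading | New folder/array- sum of odd - xor of even.py | arraysum
-- ===== SOURCE A (Python) =====
-- def arraysum(nums):
--     sum1=0
--     sum2=0
--     for i in range(len(nums)):
--         if i%2==0:
--             sum2=sum2^nums[i]
--
--         else:
--
--              sum1=sum1+nums[i]
--     return sum1-sum2
-- ===== SOURCE B (Python) =====
-- def arraysum(nums):
--     # Two strided passes: sum the odd-indexed slice, xor-fold the even-indexed slice.
--     evens = nums[0::2]
--     odds = nums[1::2]
--     x = 0
--     for v in evens:
--         x ^= v
--     return sum(odds) - x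
-- ===== Notes on version B (the rewrite author's own statement) =====
-- stated objective: simpler
-- what changed: Replaces the single index loop with a parity branch by two strided slices (nums[0::2], nums[1::2]) aggregated independently: a sum over the odd-indexed slice and an xor fold over the even-indexed slice.
import Mathlib
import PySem

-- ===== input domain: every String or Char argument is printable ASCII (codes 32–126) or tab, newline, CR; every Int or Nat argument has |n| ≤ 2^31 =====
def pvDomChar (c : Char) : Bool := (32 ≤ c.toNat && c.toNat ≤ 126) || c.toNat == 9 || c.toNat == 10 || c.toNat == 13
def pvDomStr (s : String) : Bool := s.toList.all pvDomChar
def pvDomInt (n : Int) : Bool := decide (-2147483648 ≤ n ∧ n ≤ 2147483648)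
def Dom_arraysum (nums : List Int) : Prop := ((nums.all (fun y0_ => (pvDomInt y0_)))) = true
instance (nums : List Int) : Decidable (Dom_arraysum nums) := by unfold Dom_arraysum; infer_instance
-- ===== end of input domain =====

-- B is a different decomposition (two strided passes instead of one parity-branching index loop); not faster.

-- ===== PORT A =====
-- single index loop over range(len(nums)); i is always in range, so pyGetD's default is never used
def arraysum (nums : List Int) : Int :=
  let r := (PySem.List.pyRange 0 nums.length 1).foldl
    (fun (s : Int × Int) i =>
      if PySem.Int.mod i 2 == 0 then (s.1, PySem.Int.bxor s.2 (PySem.List.pyGetD nums i 0))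
      else (s.1 + PySem.List.pyGetD nums i 0, s.2)) (0, 0)
  r.1 - r.2

-- ===== PORT B =====
-- xs[::2]: every second element (PySem.List.slice has no step parameter, so this is ported by hand; exact on all lists)
def everyOther : List Int → List Int
  | [] => []
  | [x] => [x]
  | x :: _ :: rest => x :: everyOther rest

def arraysum_alt (nums : List Int) : Int :=
  let evens := everyOther nums            -- nums[0::2]
  let odds := everyOther (nums.drop 1)    -- nums[1::2]
  let x := evens.foldl (fun a v => PySem.Int.bxor a v) 0
  odds.foldl (· + ·) 0 - x

-- ===== PRECONDITION & SPEC =====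
def Spec_arraysum (nums : List Int) (out : Int) : Prop := out = arraysum_alt nums
instance (nums : List Int) (out : Int) : Decidable (Spec_arraysum nums out) := by unfold Spec_arraysum; infer_instance

-- ===== CLAIM (what is proved, stated in full; the proofs are below) =====
def Claim_equal_arraysum : Prop := ∀ (nums : List Int), Dom_arraysum nums → Spec_arraysum nums (arraysum nums)

-- ===== LEMMAS AND PROOFS =====

lemma everyOther_cons_drop (y : Int) (rest : List Int) :
    everyOther (y :: rest) = y :: everyOther (rest.drop 1) := by
  cases rest <;> simp [everyOther]

lemma key (nums : List Int) (s s1 s2 : Int) (he : PySem.Int.mod s 2 = 0) :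
    (PySem.List.enumerate nums s).foldl
      (fun (p : Int × Int) (iv : Int × Int) =>
        if PySem.Int.mod iv.1 2 == 0 then (p.1, PySem.Int.bxor p.2 iv.2)
        else (p.1 + iv.2, p.2)) (s1, s2)
    = ((everyOther (nums.drop 1)).foldl (· + ·) s1,
       (everyOther nums).foldl (fun a v => PySem.Int.bxor a v) s2) := by
  induction nums using everyOther.induct generalizing s s1 s2 with
  | case1 => simp [PySem.List.enumerate, everyOther]
  | case2 x =>
    simp [PySem.List.enumerate, everyOther, PySem.Int.mod, Int.fmod_eq_emod] at he ⊢
    intro h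
    omega
  | case3 x y rest ih =>
    have h1 : PySem.Int.mod (s + 1) 2 ≠ 0 := by
      simp [PySem.Int.mod, Int.fmod_eq_emod] at he ⊢; omega
    have h2 : PySem.Int.mod (s + 1 + 1) 2 = 0 := by
      simp [PySem.Int.mod, Int.fmod_eq_emod] at he ⊢; omega
    simp only [PySem.List.enumerate_cons, List.foldl_cons, beq_iff_eq, he,
      if_neg h1, if_true]
    simp only [beq_iff_eq] at ih
    rw [ih (s + 1 + 1) _ _ h2]
    simp [everyOther, everyOther_cons_drop]

-- ===== VERDICT (by name: the statement is the Claim_ definition above) =====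
theorem arraysum_spec : Claim_equal_arraysum := by
  intro nums _
  unfold Spec_arraysum arraysum arraysum_alt
  have he : PySem.List.enumerate nums =
      (PySem.List.pyRange 0 (PySem.List.len nums)).map (fun j => (j, PySem.List.pyGetD nums j 0)) :=
    PySem.List.enumerate_eq_map_pyRange nums 0
  have hk := key nums 0 0 0 (by simp [PySem.Int.mod, Int.fmod_eq_emod])
  rw [he, List.foldl_map] at hk
  simp only [PySem.List.len] at hk
  simp only []
  rw [hk]
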